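-- pv_equiv track=rewrite | github.com/vatsalcode/LLM_Transformer_Queue | Abhishek Tyagi/arrayinter.py | evenOddSubarraySumN
-- ===== SOURCE A (Python) =====
-- def evenOddSubarraySumN(arr):
--     res = 0
--     for i in range(len(arr)):
--         count = 0
--         for j in range(i+1, len(arr)):
--             if((arr[j-1] % 2 == 0 and arr[j] % 2 != 0) or (arr[j-1] % 2 != 0 and arr[j] % 2 == 0)):
--                 count += 1
--         res = max(res, count)
--     return res
-- ===== SOURCE B (Python) =====
-- def evenOddSubarraySumN(arr):
--     count = 0
--     for x, y in zip(arr, arr[1:]):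
--         if (x % 2 == 0) != (y % 2 == 0):
--             count += 1
--     return count
-- ===== Notes on version B (the rewrite author's own statement) =====
-- stated objective: faster
-- what changed: Replaced the O(n^2) max-over-suffixes double loop by a single pass over adjacent pairs: the count of parity changes is maximal for the full array, so one zip pass computes the answer.
import Mathlib
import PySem

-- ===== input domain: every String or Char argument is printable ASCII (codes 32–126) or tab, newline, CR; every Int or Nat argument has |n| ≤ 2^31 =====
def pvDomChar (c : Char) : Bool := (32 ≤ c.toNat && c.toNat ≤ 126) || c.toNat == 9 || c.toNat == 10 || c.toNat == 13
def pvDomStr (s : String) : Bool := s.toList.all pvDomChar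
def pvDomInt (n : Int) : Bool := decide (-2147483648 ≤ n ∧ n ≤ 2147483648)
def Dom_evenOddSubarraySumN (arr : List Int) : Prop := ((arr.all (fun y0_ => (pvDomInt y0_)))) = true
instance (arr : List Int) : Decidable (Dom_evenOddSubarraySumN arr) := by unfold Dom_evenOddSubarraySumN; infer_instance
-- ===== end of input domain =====

-- B replaces A's O(n^2) max-over-suffixes double loop by a single pass over adjacent
-- pairs (the parity-change count of the whole array is the maximum); objective: faster.


-- ===== PORT A =====
def evenOddSubarraySumN (arr : List Int) : Int :=
  (PySem.List.pyRange 0 (PySem.List.len arr)).foldl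
    (fun res i =>
      let count : Int :=
        (PySem.List.pyRange (i+1) (PySem.List.len arr)).foldl
          (fun count j =>
            if ((PySem.Int.mod (PySem.List.pyGetD arr (j-1) 0) 2 == 0 &&
                 !(PySem.Int.mod (PySem.List.pyGetD arr j 0) 2 == 0)) ||
                (!(PySem.Int.mod (PySem.List.pyGetD arr (j-1) 0) 2 == 0) &&
                 PySem.Int.mod (PySem.List.pyGetD arr j 0) 2 == 0))
            then count + 1 else count) 0
      max res count) 0

-- ===== PORT B =====
def evenOddSubarraySumN_alt (arr : List Int) : Int :=
  (arr.zip (PySem.List.slice arr (some 1))).foldl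
    (fun count xy =>
      if ((PySem.Int.mod xy.1 2 == 0) != (PySem.Int.mod xy.2 2 == 0))
      then count + 1 else count) 0

-- ===== PRECONDITION & SPEC =====
def Spec_evenOddSubarraySumN (arr : List Int) (out : Int) : Prop := out = evenOddSubarraySumN_alt arr
instance (arr : List Int) (out : Int) : Decidable (Spec_evenOddSubarraySumN arr out) := by unfold Spec_evenOddSubarraySumN; infer_instance

-- ===== CLAIM (what is proved, stated in full; the proofs are below) =====
def Claim_equal_evenOddSubarraySumN : Prop := ∀ (arr : List Int), Dom_evenOddSubarraySumN arr → Spec_evenOddSubarraySumN arr (evenOddSubarraySumN arr)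

-- ===== LEMMAS AND PROOFS =====

-- parity-change indicator for one adjacent pair (shared reference value for both ports)
def pvChg (x y : Int) : Int :=
  if ((PySem.Int.mod x 2 == 0) != (PySem.Int.mod y 2 == 0)) then 1 else 0

-- parity-change count of a whole list (reference function)
def pvC : List Int → Int
  | x :: y :: t => pvChg x y + pvC (y :: t)
  | _ => 0

lemma pvChg_nonneg (x y : Int) : 0 ≤ pvChg x y := by
  unfold pvChg; split <;> omega

lemma pvC_nonneg (l : List Int) : 0 ≤ pvC l := by
  induction l with
  | nil => simp [pvC]
  | cons x xs ih =>
    cases xs with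
    | nil => simp [pvC]
    | cons y t =>
      have := pvChg_nonneg x y
      simp only [pvC]; omega

lemma pvC_short (l : List Int) (h : l.length ≤ 1) : pvC l = 0 := by
  match l, h with
  | [], _ => rfl
  | [x], _ => rfl

lemma pvC_tail_le (l : List Int) : pvC l.tail ≤ pvC l := by
  cases l with
  | nil => simp
  | cons x xs =>
    cases xs with
    | nil => simp [pvC]
    | cons y t =>
      have := pvChg_nonneg x y
      simp only [pvC, List.tail_cons]; omega

lemma pvC_drop_le (l : List Int) (a : Nat) : pvC (l.drop a) ≤ pvC l := by
  induction a with
  | zero => simp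
  | succ n ih =>
    calc pvC (l.drop (n+1)) = pvC (l.drop n).tail := by rw [List.tail_drop]
    _ ≤ pvC (l.drop n) := pvC_tail_le _
    _ ≤ pvC l := ih

lemma pv_bool (p q : Bool) : ((p && !q) || (!p && q)) = (p != q) := by
  cases p <;> cases q <;> rfl

lemma pv_inner_sum (k : Nat) : ∀ (arr : List Int) (a : Nat), arr.length ≤ a + k →
    ((PySem.List.pyRange ((a : Int)+1) (PySem.List.len arr)).map
      (fun j => pvChg (PySem.List.pyGetD arr (j-1) 0) (PySem.List.pyGetD arr j 0))).sum
      = pvC (arr.drop a) := by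
  induction k with
  | zero =>
    intro arr a h
    rw [PySem.List.pyRange_one_eq_nil (by simp [PySem.List.len]; omega)]
    rw [List.drop_eq_nil_of_le (by omega)]
    rfl
  | succ k ih =>
    intro arr a h
    by_cases hle : arr.length ≤ a + 1
    · rw [PySem.List.pyRange_one_eq_nil (by simp [PySem.List.len]; exact_mod_cast hle)]
      rw [pvC_short _ (by simp; omega)]
      rfl
    · push Not at hle
      have h1 : (a : Int) + 1 < PySem.List.len arr := by
        simp [PySem.List.len]; exact_mod_cast hle
      rw [PySem.List.pyRange_one_cons h1, List.map_cons, List.sum_cons]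
      have hga : ((a : Int) + 1) - 1 = ((a : Nat) : Int) := by ring
      have hga1 : ((a : Int) + 1) = (((a+1 : Nat)) : Int) := by push_cast; ring
      have hrec : ((PySem.List.pyRange ((a : Int)+1+1) (PySem.List.len arr)).map
          (fun j => pvChg (PySem.List.pyGetD arr (j-1) 0) (PySem.List.pyGetD arr j 0))).sum
          = pvC (arr.drop (a+1)) := by
        have hidx : (a : Int) + 1 + 1 = (((a+1 : Nat)) : Int) + 1 := by push_cast; ring
        rw [hidx]
        exact ih arr (a+1) (by omega)
      rw [hrec, hga, hga1]
      rw [PySem.List.pyGetD_natCast, PySem.List.pyGetD_natCast]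
      have ha : a < arr.length := by omega
      have ha1 : a + 1 < arr.length := by omega
      rw [List.drop_eq_getElem_cons ha, List.drop_eq_getElem_cons ha1]
      simp only [pvC]
      rw [List.getD_eq_getElem _ _ ha, List.getD_eq_getElem _ _ ha1]

-- A's inner count at index i equals the parity-change count of the suffix from i
lemma pv_inner_val (arr : List Int) (i : Int) (h0 : 0 ≤ i) (_hle : i.toNat ≤ arr.length) :
    ((PySem.List.pyRange (i+1) (PySem.List.len arr)).foldl
      (fun count j =>
        if ((PySem.Int.mod (PySem.List.pyGetD arr (j-1) 0) 2 == 0 &&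
             !(PySem.Int.mod (PySem.List.pyGetD arr j 0) 2 == 0)) ||
            (!(PySem.Int.mod (PySem.List.pyGetD arr (j-1) 0) 2 == 0) &&
             PySem.Int.mod (PySem.List.pyGetD arr j 0) 2 == 0))
        then count + 1 else count) 0)
      = pvC (arr.drop i.toNat) := by
  have hstep : (fun (count : Int) (j : Int) =>
      if ((PySem.Int.mod (PySem.List.pyGetD arr (j-1) 0) 2 == 0 &&
           !(PySem.Int.mod (PySem.List.pyGetD arr j 0) 2 == 0)) ||
          (!(PySem.Int.mod (PySem.List.pyGetD arr (j-1) 0) 2 == 0) &&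
           PySem.Int.mod (PySem.List.pyGetD arr j 0) 2 == 0))
      then count + 1 else count)
      = fun count j => count + pvChg (PySem.List.pyGetD arr (j-1) 0) (PySem.List.pyGetD arr j 0) := by
    funext c j
    rw [pv_bool]
    unfold pvChg
    split <;> omega
  rw [hstep, PySem.List.foldl_add, zero_add]
  have hi : i = ((i.toNat : Nat) : Int) := (Int.toNat_of_nonneg h0).symm
  rw [hi]
  exact pv_inner_sum arr.length arr i.toNat (by omega)

lemma pv_fold_max_const (g : Int → Int) (l : List Int) (acc : Int)
    (h : ∀ i ∈ l, g i ≤ acc) :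
    l.foldl (fun r i => max r (g i)) acc = acc := by
  induction l generalizing acc with
  | nil => rfl
  | cons x xs ih =>
    have hx : max acc (g x) = acc := by
      have := h x (by simp); omega
    simp only [List.foldl_cons, hx]
    exact ih acc (fun i hi => h i (by simp [hi]))

-- B computes pvC
lemma pv_alt_eq (arr : List Int) : evenOddSubarraySumN_alt arr = pvC arr := by
  unfold evenOddSubarraySumN_alt
  rw [PySem.List.slice_from arr (by norm_num)]
  have hstep : (fun (count : Int) (xy : Int × Int) =>
      if ((PySem.Int.mod xy.1 2 == 0) != (PySem.Int.mod xy.2 2 == 0))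
      then count + 1 else count)
      = fun count xy => count + pvChg xy.1 xy.2 := by
    funext c xy; unfold pvChg; split <;> omega
  rw [hstep, PySem.List.foldl_add, zero_add]
  induction arr with
  | nil => rfl
  | cons x xs ih =>
    cases xs with
    | nil => rfl
    | cons y t =>
      simp only [Int.toNat_one, List.drop_one, List.tail_cons, List.zip_cons_cons,
        List.map_cons, List.sum_cons] at ih ⊢
      rw [ih]
      simp [pvC]

-- ===== VERDICT (by name: the statement is the Claim_ definition above) =====
theorem evenOddSubarraySumN_spec : Claim_equal_evenOddSubarraySumN := by
  intro arr _
  unfold Spec_evenOddSubarraySumN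
  rw [pv_alt_eq]
  unfold evenOddSubarraySumN
  cases arr with
  | nil => rfl
  | cons x xs =>
    have hn : (0 : Int) < PySem.List.len (x :: xs) := by
      simp [PySem.List.len]
    rw [PySem.List.pyRange_one_cons hn]
    simp only [List.foldl_cons]
    rw [pv_inner_val (x :: xs) 0 (by norm_num) (by simp)]
    simp only [Int.toNat_zero, List.drop_zero, zero_add]
    have hmax : max (0 : Int) (pvC (x :: xs)) = pvC (x :: xs) := by
      have := pvC_nonneg (x :: xs); omega
    rw [hmax]
    -- remaining iterations never exceed the i = 0 count
    have hcong : ((PySem.List.pyRange 1 (PySem.List.len (x :: xs))).foldl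
        (fun res i =>
          max res ((PySem.List.pyRange (i+1) (PySem.List.len (x :: xs))).foldl
            (fun count j =>
              if ((PySem.Int.mod (PySem.List.pyGetD (x :: xs) (j-1) 0) 2 == 0 &&
                   !(PySem.Int.mod (PySem.List.pyGetD (x :: xs) j 0) 2 == 0)) ||
                  (!(PySem.Int.mod (PySem.List.pyGetD (x :: xs) (j-1) 0) 2 == 0) &&
                   PySem.Int.mod (PySem.List.pyGetD (x :: xs) j 0) 2 == 0))
              then count + 1 else count) 0)) (pvC (x :: xs)))
        = (PySem.List.pyRange 1 (PySem.List.len (x :: xs))).foldl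
        (fun res i => max res (pvC ((x :: xs).drop i.toNat))) (pvC (x :: xs)) := by
      apply PySem.List.foldl_congr_mem
      intro acc i hi
      have hmem := (PySem.List.mem_pyRange_one).mp hi
      have h0 : (0 : Int) ≤ i := by omega
      have hlt : i < PySem.List.len (x :: xs) := hmem.2
      have hlen : i.toNat ≤ (x :: xs).length := by
        simp only [PySem.List.len, List.length_cons] at hlt
        simp only [List.length_cons]
        omega
      rw [pv_inner_val (x :: xs) i h0 hlen]
    rw [hcong]
    apply pv_fold_max_const
    intro i _
    exact pvC_drop_le (x :: xs) i.toNat
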